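-- pv_equiv track=rewrite | github.com/SpaceTimeNarratives/spatio-textual | annotation/utils.py | distribute_into_segments
-- ===== SOURCE A (Python) =====
-- def distribute_into_segments(strings, num_segments=100):
--   # Calculate the size of each segment
--   segment_size = len(strings) // num_segments
--   remainder = len(strings) % num_segments
--
--   segments, start = [], 0
--
--   for i in range(num_segments):
--       # Calculate the end index for this segment
--       end = start + segment_size + (1 if i < remainder else 0)
--       # Append the segment to the list
--       segments.append(strings[start:end])
--       # Update the start index for the next segment
--       start = end
--   return segments
-- ===== SOURCE B (Python) =====
-- def distribute_into_segments(strings, num_segments=100):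
--     # Boundary-table decomposition: b[i] = i*segment_size + min(i, remainder)
--     segment_size = len(strings) // num_segments
--     remainder = len(strings) % num_segments
--     boundaries = [i * segment_size + min(i, remainder) for i in range(num_segments + 1)]
--     return [strings[boundaries[i]:boundaries[i + 1]] for i in range(num_segments)]
-- ===== Notes on version B (the rewrite author's own statement) =====
-- stated objective: alternative
-- what changed: Replaces the sequential start-accumulator loop by a precomputed closed-form boundary table b[i] = i*segment_size + min(i, remainder) and slices strings[b[i]:b[i+1]] directly by index.
import Mathlib
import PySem

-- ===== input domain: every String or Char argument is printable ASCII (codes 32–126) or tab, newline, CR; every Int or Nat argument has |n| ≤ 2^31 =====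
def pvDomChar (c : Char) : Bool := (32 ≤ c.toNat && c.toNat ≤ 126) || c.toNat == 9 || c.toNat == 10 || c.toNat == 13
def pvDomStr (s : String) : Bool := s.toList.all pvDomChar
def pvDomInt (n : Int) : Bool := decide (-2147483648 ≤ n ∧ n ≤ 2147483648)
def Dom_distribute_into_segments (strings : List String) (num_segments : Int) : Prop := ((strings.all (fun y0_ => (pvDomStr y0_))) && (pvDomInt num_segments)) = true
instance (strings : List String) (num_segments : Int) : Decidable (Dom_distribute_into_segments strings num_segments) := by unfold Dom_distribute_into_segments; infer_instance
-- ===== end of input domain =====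

-- ===== PORT A =====
-- A: sequential loop threading a running `start` accumulator, appending slices.
def distribute_into_segments (strings : List String) (num_segments : Int) : List (List String) :=
  let segment_size := PySem.Int.floordiv (strings.length : Int) num_segments
  let remainder := PySem.Int.mod (strings.length : Int) num_segments
  ((PySem.List.pyRange 0 num_segments 1).foldl
    (fun (acc : List (List String) × Int) i =>
      let e := acc.2 + segment_size + (if i < remainder then 1 else 0)
      (acc.1 ++ [PySem.List.slice strings (some acc.2) (some e)], e))
    ([], 0)).1

-- ===== PORT B =====
-- B: closed-form boundary table b[i] = i*segment_size + min(i, remainder), then direct slicing.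
def distribute_into_segments_alt (strings : List String) (num_segments : Int) : List (List String) :=
  let segment_size := PySem.Int.floordiv (strings.length : Int) num_segments
  let remainder := PySem.Int.mod (strings.length : Int) num_segments
  let boundaries := (PySem.List.pyRange 0 (num_segments + 1) 1).map
    (fun i => i * segment_size + min i remainder)
  (PySem.List.pyRange 0 num_segments 1).map
    (fun i => PySem.List.slice strings
      (some (PySem.List.pyGetD boundaries i 0))
      (some (PySem.List.pyGetD boundaries (i + 1) 0)))

-- ===== PRECONDITION & SPEC =====
-- Pre_ excludes exactly num_segments = 0, where Python A (and B) raise ZeroDivisionError.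
def Pre_distribute_into_segments (strings : List String) (num_segments : Int) : Prop :=
  num_segments ≠ 0
instance (strings : List String) (num_segments : Int) : Decidable (Pre_distribute_into_segments strings num_segments) := by unfold Pre_distribute_into_segments; infer_instance
def pvWitness_distribute_into_segments : List String × Int := (["a", "b", "c"], 2)

def Spec_distribute_into_segments (strings : List String) (num_segments : Int) (out : List (List String)) : Prop := out = distribute_into_segments_alt strings num_segments
instance (strings : List String) (num_segments : Int) (out : List (List String)) : Decidable (Spec_distribute_into_segments strings num_segments out) := by unfold Spec_distribute_into_segments; infer_instance

-- ===== CLAIM (what is proved, stated in full; the proofs are below) =====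
def Claim_equal_distribute_into_segments : Prop := ∀ (strings : List String) (num_segments : Int), Dom_distribute_into_segments strings num_segments → Pre_distribute_into_segments strings num_segments → Spec_distribute_into_segments strings num_segments (distribute_into_segments strings num_segments)

-- ===== LEMMAS AND PROOFS =====

-- the closed-form boundary function
def pvBnd (ss r i : Int) : Int := i * ss + min i r

lemma pvBnd_step (ss r i : Int) :
    pvBnd ss r (i + 1) = pvBnd ss r i + ss + (if i < r then 1 else 0) := by
  unfold pvBnd
  by_cases h : r ≤ i
  · simp [h, not_lt.mpr h, le_trans h (by omega : i ≤ i + 1)]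
    ring
  · have h2 : i + 1 ≤ r := by omega
    have h3 : i < r := by omega
    simp [h2, h3, min_eq_left (by omega : i ≤ r)]
    ring

-- loop invariant for A's fold: starting from (segs, pvBnd ss r a) it appends the closed-form slices
lemma pvFold_inv (strings : List String) (ss r : Int) :
    ∀ (n : Nat) (a : Int) (segs : List (List String)),
    ((PySem.List.pyRange a (a + n) 1).foldl
      (fun (acc : List (List String) × Int) i =>
        let e := acc.2 + ss + (if i < r then 1 else 0)
        (acc.1 ++ [PySem.List.slice strings (some acc.2) (some e)], e))
      (segs, pvBnd ss r a)).1
    = segs ++ (PySem.List.pyRange a (a + n) 1).map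
        (fun i => PySem.List.slice strings (some (pvBnd ss r i)) (some (pvBnd ss r (i + 1)))) := by
  intro n
  induction n with
  | zero => intro a segs; simp
  | succ m ih =>
    intro a segs
    have hlt : a < a + ((m : Nat) + 1 : Nat) := by push_cast; omega
    rw [PySem.List.pyRange_one_cons hlt]
    simp only [List.foldl_cons, List.map_cons]
    have h1 : a + ((m : Nat) + 1 : Nat) = (a + 1) + (m : Nat) := by push_cast; omega
    rw [h1]
    have := ih (a + 1) (segs ++ [PySem.List.slice strings (some (pvBnd ss r a)) (some (pvBnd ss r a + ss + (if a < r then 1 else 0)))])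
    rw [← pvBnd_step] at this
    simpa [List.append_assoc, pvBnd_step] using this

-- ===== VERDICT (by name: the statement is the Claim_ definition above) =====
theorem distribute_into_segments_spec : Claim_equal_distribute_into_segments := by
  intro strings num_segments _ hpre
  unfold Spec_distribute_into_segments distribute_into_segments distribute_into_segments_alt
  set ss := PySem.Int.floordiv (strings.length : Int) num_segments with hss
  set r := PySem.Int.mod (strings.length : Int) num_segments with hr
  by_cases hle : num_segments ≤ 0
  · rw [PySem.List.pyRange_one_eq_nil hle]
    simp
  · have hpos : 0 < num_segments := by omega
    have hn : num_segments = (0 : Int) + (num_segments.toNat : Nat) := by omega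
    have hfold := pvFold_inv strings ss r num_segments.toNat 0 []
    have hrn : (0:Int) ≤ r := by rw [hr]; exact PySem.Int.mod_nonneg _ hpos
    have h0 : pvBnd ss r 0 = 0 := by unfold pvBnd; omega
    rw [h0] at hfold
    have harg : (0 : Int) + (num_segments.toNat : Nat) = num_segments := by omega
    rw [harg] at hfold
    rw [hfold]
    simp only [List.nil_append]
    apply List.map_congr_left
    intro i hi
    rw [PySem.List.mem_pyRange_one] at hi
    have hb1 : PySem.List.pyGetD ((PySem.List.pyRange 0 (num_segments + 1) 1).map (fun i => i * ss + min i r)) i 0 = i * ss + min i r :=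
      PySem.List.pyGetD_map_pyRange_of_nonneg _ _ _ _ (by omega) (by omega)
    have hb2 : PySem.List.pyGetD ((PySem.List.pyRange 0 (num_segments + 1) 1).map (fun i => i * ss + min i r)) (i + 1) 0 = (i + 1) * ss + min (i + 1) r :=
      PySem.List.pyGetD_map_pyRange_of_nonneg _ _ _ _ (by omega) (by omega)
    rw [hb1, hb2]
    rfl
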